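-- pv_equiv track=rewrite | github.com/youngnvk/TTATTT | Python/bai36.py | boyer
-- ===== SOURCE A (Python) =====
-- def boyer(P, T):
--     m = len(P)
--     n = len(T)
--     if m > n:
--         return -1
--     i = j = m - 1
--     while(i < n):
--         if P[j] == T[i]:
--             if j == 0:
--                 return i #trả về vị trí của điểm giống nhau trong T để in ra
--             else: #kiểm tra tiếp theo
--                 i = i - 1
--                 j = j - 1
--         else:#không giống nên nhảy
--             #tiền xử lý
--             i = i + m - min(j, 1 + check_last_P(T[i],P)) #cập nhật vị trí i
--             j = m - 1 #cập nhật lại j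
--     return -1 #không tìm thấy
--
-- def check_last_P(k, P): #hàm kiểm tra vị trí cuối cùng trong P
--     vt = -1 #không có kí tự thì trả về vị trí là -1
--     for i in range(0, len(P)):
--         if k == P[i]:
--             vt = i #cứ chạy đến cuối sẽ ra vị trí đầu tiên
--     return vt
-- ===== SOURCE B (Python) =====
-- def boyer(P, T):
--     m, n = len(P), len(T)
--     for s in range(n - m + 1):
--         j = 0
--         while j < m and P[j] == T[s + j]:
--             j += 1
--         if j == m:
--             return s
--     return -1
-- ===== Notes on version B (the rewrite author's own statement) =====
-- stated objective: simpler
-- what changed: B replaces A's Boyer-Moore search (right-to-left comparison with a bad-character jump computed by rescanning the whole pattern on every mismatch) by the plain brute-force scan: try every alignment left-to-right, always shifting by one, with no jump heuristic at all.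
import Mathlib
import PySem

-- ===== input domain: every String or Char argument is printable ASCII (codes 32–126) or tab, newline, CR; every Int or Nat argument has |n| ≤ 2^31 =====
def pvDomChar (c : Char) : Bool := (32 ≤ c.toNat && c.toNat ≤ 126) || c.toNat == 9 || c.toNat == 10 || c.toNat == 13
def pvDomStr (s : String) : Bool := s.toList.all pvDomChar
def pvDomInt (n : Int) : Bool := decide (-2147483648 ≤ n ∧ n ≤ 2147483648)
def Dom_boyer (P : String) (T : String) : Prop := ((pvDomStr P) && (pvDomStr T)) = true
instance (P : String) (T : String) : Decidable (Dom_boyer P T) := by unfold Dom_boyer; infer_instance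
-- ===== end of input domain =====

-- B replaces A's Boyer-Moore search (right-to-left scan with a bad-character jump) by the
-- plain brute-force check of every alignment, shifting by one (objective: simpler).

-- ===== PORT A =====
-- check_last_P(k, P): scan all of P, remember the last index holding k (-1 if none)
def lastA (k : Char) (P : List Char) : Int :=
  (PySem.List.pyRange 0 (PySem.List.len P) 1).foldl
    (fun vt i => if k = PySem.List.pyGetD P i ' ' then i else vt) (-1)

-- A's while-loop as a recursion on the state (i, j); j is kept as a Nat (in Python it is an
-- int that stays ≥ 0 on every input on which A returns — see Pre_boyer).  The `none` match
-- arm is Python's IndexError (only reachable for P = "", which Pre_boyer excludes).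
def loopA (P T : List Char) (n : Int) (i : Int) (j : Nat) : Int :=
  if _h : i < n then
    match hp : PySem.List.pyGet? P (j : Int), ht : PySem.List.pyGet? T i with
    | some pj, some ti =>
      if pj = ti then
        if j = 0 then i
        else loopA P T n (i - 1) (j - 1)
      else loopA P T n (i + P.length - min (j : Int) (1 + lastA ti P)) (P.length - 1)
    | _, _ => -1
  else -1
termination_by ((n - (i - (j : Int))).toNat, j)
decreasing_by
  · apply Prod.Lex.right'
    · have hj : (1:Nat) ≤ j := by omega
      omega
    · omega
  · apply Prod.Lex.left
    have hP : P ≠ [] := by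
      intro h; subst h; simp [PySem.List.pyGet?] at hp
    have hm : 1 ≤ P.length := List.length_pos_iff.mpr hP
    have hmin : min (j : Int) (1 + lastA ti P) ≤ (j : Int) := min_le_left _ _
    have hcast : ((P.length - 1 : Nat) : Int) = (P.length : Int) - 1 := by omega
    omega

def boyer (P : String) (T : String) : Int :=
  let m : Int := PySem.List.len P.toList
  let n : Int := PySem.List.len T.toList
  if m > n then -1
  else loopA P.toList T.toList n (m - 1) (P.toList.length - 1)

-- ===== PORT B =====
-- inner loop: while j < m and P[j] == T[s+j]: j += 1 ; returns the final j
def innerN (P T : List Char) (s : Int) (j : Int) : Int :=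
  if _h : j < (P.length : Int) then
    match PySem.List.pyGet? P j, PySem.List.pyGet? T (s + j) with
    | some pj, some tj => if pj = tj then innerN P T s (j + 1) else j
    | _, _ => j
  else j
termination_by ((P.length : Int) - j).toNat
decreasing_by omega

-- for s in range(n - m + 1): … return s on full match … ; return -1 after the loop
def outerN (P T : List Char) (s : Int) : Int :=
  if _h : s < (T.length : Int) - (P.length : Int) + 1 then
    if innerN P T s 0 = (P.length : Int) then s else outerN P T (s + 1)
  else -1
termination_by ((T.length : Int) - (P.length : Int) + 1 - s).toNat
decreasing_by omega

def boyer_alt (P : String) (T : String) : Int := outerN P.toList T.toList 0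

-- ===== PRECONDITION & SPEC =====
-- Pre_ excludes only P = "", on which A always raises IndexError (it indexes P[-1]).
def Pre_boyer (P : String) (T : String) : Prop := P ≠ ""
instance (P : String) (T : String) : Decidable (Pre_boyer P T) := by unfold Pre_boyer; infer_instance
def pvWitness_boyer : String × String := ("ab", "aab")

def Spec_boyer (P : String) (T : String) (out : Int) : Prop := out = boyer_alt P T
instance (P : String) (T : String) (out : Int) : Decidable (Spec_boyer P T out) := by unfold Spec_boyer; infer_instance

-- ===== CLAIM (what is proved, stated in full; the proofs are below) =====
def Claim_equal_boyer : Prop := ∀ (P : String) (T : String), Dom_boyer P T → Pre_boyer P T → Spec_boyer P T (boyer P T)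

-- ===== LEMMAS AND PROOFS =====

-- "P occurs in T at alignment s" (indices via pyGet?, so it also forces s+k in range)
def matchAt (P T : List Char) (s : Int) : Prop :=
  ∀ (k : Nat) (h : k < P.length), PySem.List.pyGet? T (s + (k : Int)) = some (P[k]'h)

-- lastA over a snoc
lemma lastA_append (k x : Char) (P : List Char) :
    lastA k (P ++ [x]) = if k = x then (P.length : Int) else lastA k P := by
  have hrange : PySem.List.pyRange 0 (PySem.List.len (P ++ [x])) 1
      = PySem.List.pyRange 0 (PySem.List.len P) 1 ++ [(P.length : Int)] := by
    simp only [PySem.List.len_eq, List.length_append, List.length_cons, List.length_nil]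
    rw [show ((P.length + 1 : Nat) : Int) = (P.length : Int) + 1 by push_cast; ring]
    exact PySem.List.pyRange_one_succ_right (by positivity)
  have hcong : (PySem.List.pyRange 0 (PySem.List.len P) 1).foldl
      (fun vt i => if k = PySem.List.pyGetD (P ++ [x]) i ' ' then i else vt) (-1)
      = (PySem.List.pyRange 0 (PySem.List.len P) 1).foldl
      (fun vt i => if k = PySem.List.pyGetD P i ' ' then i else vt) (-1) := by
    apply PySem.List.foldl_congr_mem
    intro acc i hi
    rw [PySem.List.mem_pyRange_one] at hi
    simp only [PySem.List.len_eq] at hi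
    rw [PySem.List.pyGetD_eq_getElem _ _ hi.1 (by simp; omega),
        PySem.List.pyGetD_eq_getElem _ _ hi.1 (by omega),
        List.getElem_append_left]
  unfold lastA
  rw [hrange, List.foldl_append, hcong]
  simp only [List.foldl_cons, List.foldl_nil]
  rw [show PySem.List.pyGetD (P ++ [x]) (P.length : Int) ' ' = x by
    rw [PySem.List.pyGetD_natCast]; simp]

lemma lastA_lb (k : Char) (P : List Char) : -1 ≤ lastA k P := by
  induction P using List.reverseRecOn with
  | nil => simp [lastA, PySem.List.pyRange]
  | append_singleton P x ih =>
    rw [lastA_append]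
    split_ifs
    · omega
    · exact ih

-- no occurrence of k in P strictly above lastA k P
lemma lastA_no_above (k : Char) (P : List Char) :
    ∀ (i : Nat) (h : i < P.length), lastA k P < (i : Int) → P[i] ≠ k := by
  induction P using List.reverseRecOn with
  | nil => intro i h; exact absurd h (by simp)
  | append_singleton P x ih =>
    intro i h hlt
    rw [lastA_append] at hlt
    by_cases hk : k = x
    · rw [if_pos hk] at hlt
      simp only [List.length_append, List.length_cons, List.length_nil] at h
      omega
    · rw [if_neg hk] at hlt
      simp only [List.length_append, List.length_cons, List.length_nil] at h
      by_cases hi : i < P.length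
      · rw [List.getElem_append_left hi]
        exact ih i hi hlt
      · have : i = P.length := by omega
        subst this
        rw [List.getElem_append_right (by omega)]
        simpa using fun he => hk he.symm

-- innerN reaches m on a full match
lemma innerN_of_match (P T : List Char) (s : Int) (hm : matchAt P T s) :
    ∀ (d j : Nat), j ≤ P.length → P.length - j ≤ d →
      innerN P T s (j : Int) = (P.length : Int) := by
  intro d
  induction d with
  | zero =>
    intro j hj hd
    have : j = P.length := by omega
    subst this
    rw [innerN, dif_neg (by omega)]
  | succ d ihd =>
    intro j hj hd
    by_cases hlt : j < P.length
    · have hp : PySem.List.pyGet? P (j : Int) = some (P[j]'hlt) := by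
        rw [PySem.List.pyGet?_natCast]; exact List.getElem?_eq_getElem hlt
      have ht := hm j hlt
      rw [innerN, dif_pos (by exact_mod_cast hlt), hp, ht]
      simp only []
      rw [show (j : Int) + 1 = ((j + 1 : Nat) : Int) by push_cast; ring]
      exact ihd (j + 1) (by omega) (by omega)
    · have : j = P.length := by omega
      subst this
      rw [innerN, dif_neg (by omega)]

-- innerN = m implies every position from j on matches
lemma innerN_matches (P T : List Char) (s : Int) :
    ∀ (d j : Nat), P.length - j ≤ d → innerN P T s (j : Int) = (P.length : Int) →
      ∀ (k : Nat) (h : k < P.length), j ≤ k →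
        PySem.List.pyGet? T (s + (k : Int)) = some (P[k]'h) := by
  intro d
  induction d with
  | zero =>
    intro j hd he k hk hjk
    omega
  | succ d ihd =>
    intro j hd he k hk hjk
    have hlt : j < P.length := by omega
    rw [innerN, dif_pos (by exact_mod_cast hlt)] at he
    have hp : PySem.List.pyGet? P (j : Int) = some (P[j]'hlt) := by
      rw [PySem.List.pyGet?_natCast]; exact List.getElem?_eq_getElem hlt
    rcases hT : PySem.List.pyGet? T (s + (j : Int)) with _ | tj
    · simp only [hp, hT] at he; omega
    · simp only [hp, hT] at he
      by_cases heq : P[j]'hlt = tj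
      · rw [if_pos heq] at he
        rw [show (j : Int) + 1 = ((j + 1 : Nat) : Int) by push_cast; ring] at he
        by_cases hkj : k = j
        · subst hkj; rw [hT, heq]
        · exact ihd (j + 1) (by omega) he k hk (by omega)
      · rw [if_neg heq] at he
        simp at he; omega

lemma innerN_zero_match_iff (P T : List Char) (s : Int) :
    innerN P T s 0 = (P.length : Int) ↔ matchAt P T s := by
  constructor
  · intro h k hk
    have := innerN_matches P T s P.length 0 (by omega) (by exact_mod_cast h) k hk (by omega)
    exact this
  · intro h
    have := innerN_of_match P T s h P.length 0 (by omega) (by omega)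
    exact_mod_cast this

-- brute force skips an alignment with no match
lemma outerN_step (P T : List Char) (s : Int) (hnm : ¬ matchAt P T s) :
    outerN P T s = outerN P T (s + 1) := by
  by_cases hlt : s < (T.length : Int) - (P.length : Int) + 1
  · rw [outerN, dif_pos hlt]
    rw [if_neg (fun h => hnm ((innerN_zero_match_iff P T s).mp h))]
  · rw [outerN, dif_neg hlt, outerN, dif_neg (by omega)]

lemma outerN_skip (P T : List Char) :
    ∀ (d : Nat) (s s' : Int), s ≤ s' → s' - s ≤ (d : Int) →
      (∀ t, s ≤ t → t < s' → ¬ matchAt P T t) → outerN P T s = outerN P T s' := by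
  intro d
  induction d with
  | zero => intro s s' h1 h2 _; have : s = s' := by omega
            rw [this]
  | succ d ihd =>
    intro s s' h1 h2 hnm
    by_cases he : s = s'
    · rw [he]
    · rw [outerN_step P T s (hnm s le_rfl (by omega))]
      exact ihd (s + 1) s' (by omega) (by omega) (fun t ht1 ht2 => hnm t (by omega) ht2)

-- full match at an admissible alignment: brute force returns it
lemma outerN_at_match (P T : List Char) (s : Int) (hs : s ≤ (T.length : Int) - (P.length : Int))
    (hm : matchAt P T s) : outerN P T s = s := by
  rw [outerN, dif_pos (by omega), if_pos ((innerN_zero_match_iff P T s).mpr hm)]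

-- the inner descent of A: from alignment s with suffix positions (j, m-1] already matched,
-- A's loop computes what the brute-force scan from s computes
lemma aux_inner (P T : List Char) (s : Int) (hs : 0 ≤ s)
    (hsm : s + (P.length : Int) ≤ (T.length : Int))
    (IH : ∀ s', s < s' → 0 ≤ s' →
      loopA P T (T.length : Int) (s' + (P.length : Int) - 1) (P.length - 1) = outerN P T s') :
    ∀ (j : Nat), j < P.length →
      (∀ (k : Nat) (h : k < P.length), j < k → PySem.List.pyGet? T (s + (k : Int)) = some (P[k]'h)) →
      loopA P T (T.length : Int) (s + (j : Int)) j = outerN P T s := by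
  intro j
  induction j using Nat.strong_induction_on with
  | _ j ihj =>
  intro hj hsuf
  have hjm : (j : Int) < (P.length : Int) := by exact_mod_cast hj
  have hlt : s + (j : Int) < (T.length : Int) := by omega
  have h0 : (0:Int) ≤ s + (j : Int) := by omega
  have hpj : PySem.List.pyGet? P (j : Int) = some (P[j]'hj) := by
    rw [PySem.List.pyGet?_natCast]; exact List.getElem?_eq_getElem hj
  have hti : PySem.List.pyGet? T (s + (j : Int)) = some (T[(s + (j:Int)).toNat]'(by omega)) :=
    PySem.List.pyGet?_eq_some_getElem _ h0 hlt
  set ti := T[(s + (j:Int)).toNat]'(by omega) with hti_def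
  rw [loopA, dif_pos hlt, hpj, hti]
  simp only []
  by_cases heq : P[j]'hj = ti
  · simp only [if_pos heq]
    by_cases hz : j = 0
    · subst hz
      have hmatch : matchAt P T s := by
        intro k hk
        by_cases hk0 : k = 0
        · subst hk0; rw [hti, heq]
        · exact hsuf k hk (by omega)
      rw [outerN_at_match P T s (by omega) hmatch]
      simp
    · rw [if_neg hz]
      have hc : ((j:Int)) - 1 = ((j - 1 : Nat) : Int) := by omega
      have hc2 : s + (j:Int) - 1 = s + ((j - 1 : Nat) : Int) := by omega
      rw [hc2]
      apply ihj (j - 1) (by omega) (by omega)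
      intro k hk hgt
      by_cases hkj : k = j
      · subst hkj; rw [hti, heq]
      · exact hsuf k hk (by omega)
  · simp only [if_neg heq]
    set L := lastA ti P with hL
    have hLlb : -1 ≤ L := lastA_lb ti P
    have hminj : min (j : Int) (1 + L) ≤ (j : Int) := min_le_left _ _
    -- the new alignment after the bad-character shift
    set s' := s + (j : Int) + 1 - min (j : Int) (1 + L) with hs'
    have hshift : s + (j:Int) + (P.length : Int) - min (j:Int) (1 + L)
        = s' + (P.length : Int) - 1 := by omega
    rw [hshift, IH s' (by omega) (by omega)]
    -- no occurrence at any alignment in [s, s')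
    apply (outerN_skip P T (s' - s).toNat s s' (by omega) (by omega) ?_).symm
    intro t ht1 ht2 hmt
    by_cases hts : t = s
    · subst hts
      have := hmt j hj
      rw [hti] at this
      exact heq (by injection this with h; exact h.symm)
    · -- s < t < s' forces an occurrence of ti in P above its last occurrence
      have htgt : s < t := by omega
      have hminL : min (j : Int) (1 + L) = 1 + L := by omega
      -- k := s + j - t
      have hk0 : (0:Int) ≤ s + (j:Int) - t := by omega
      set k := (s + (j:Int) - t).toNat with hk
      have hkc : (k : Int) = s + (j:Int) - t := by omega
      have hkm : k < P.length := by omega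
      have hLk : L < (k : Int) := by omega
      have := hmt k hkm
      rw [show t + (k : Int) = s + (j : Int) by omega, hti] at this
      have hPk : P[k]'hkm = ti := by injection this with h; exact h.symm
      exact lastA_no_above ti P k hkm hLk hPk

lemma main_loop (P T : List Char) (hP : P ≠ []) :
    ∀ (s : Int), 0 ≤ s →
      loopA P T (T.length : Int) (s + (P.length : Int) - 1) (P.length - 1) = outerN P T s := by
  have hm : 1 ≤ P.length := List.length_pos_iff.mpr hP
  have hneg : ∀ (s : Int), ¬ (s ≤ (T.length : Int) - (P.length : Int)) →
      loopA P T (T.length : Int) (s + (P.length : Int) - 1) (P.length - 1) = outerN P T s := by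
    intro s hgt
    rw [loopA, dif_neg (by omega), outerN, dif_neg (by omega)]
  have key : ∀ (N : Nat) (s : Int), ((T.length : Int) - s).toNat ≤ N → 0 ≤ s →
      loopA P T (T.length : Int) (s + (P.length : Int) - 1) (P.length - 1) = outerN P T s := by
    intro N
    induction N with
    | zero =>
      intro s hsN hs
      exact hneg s (by omega)
    | succ N IH =>
      intro s hsN hs
      by_cases hle : s ≤ (T.length : Int) - (P.length : Int)
      · have hIH : ∀ s', s < s' → 0 ≤ s' →
            loopA P T (T.length : Int) (s' + (P.length : Int) - 1) (P.length - 1) = outerN P T s' := by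
          intro s' hss' hs'
          exact IH s' (by omega) hs'
        have haux := aux_inner P T s hs (by omega) hIH (P.length - 1) (by omega)
          (by intro k hk hgt; omega)
        have hc : ((P.length - 1 : Nat) : Int) = (P.length : Int) - 1 := by omega
        rw [hc] at haux
        rw [show s + ((P.length : Int) - 1) = s + (P.length : Int) - 1 by ring] at haux
        exact haux
      · exact hneg s hle
  exact fun s hs => key _ s le_rfl hs

-- ===== VERDICT (by name: the statement is the Claim_ definition above) =====
theorem boyer_spec : Claim_equal_boyer := by
  intro P T _ hpre
  unfold Spec_boyer boyer boyer_alt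
  have hP : P.toList ≠ [] := by
    intro h
    exact hpre (String.toList_eq_nil_iff.mp h)
  have hm : 1 ≤ P.toList.length := List.length_pos_iff.mpr hP
  simp only [PySem.List.len_eq]
  by_cases hmn : (P.toList.length : Int) > (T.toList.length : Int)
  · rw [if_pos hmn, outerN, dif_neg (by omega)]
  · rw [if_neg hmn]
    have := main_loop P.toList T.toList hP 0 le_rfl
    rw [show ((P.toList.length : Int) - 1) = 0 + (P.toList.length : Int) - 1 by ring]
    exact this
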